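-- pv_equiv track=rewrite | github.com/misc-de/HA-Schulmanager | custom_components/schulmanager/sensor.py | _week_rows
-- ===== SOURCE A (Python) =====
-- def _week_rows(week: dict[str, list[str]]) -> list[dict[str, str]]:
--     order = [
--         ("Mo", week.get("monday") or week.get("Montag") or []),
--         ("Di", week.get("tuesday") or week.get("Dienstag") or []),
--         ("Mi", week.get("wednesday") or week.get("Mittwoch") or []),
--         ("Do", week.get("thursday") or week.get("Donnerstag") or []),
--         ("Fr", week.get("friday") or week.get("Freitag") or []),
--     ]
--     max_len = max((len(values) for _, values in order), default=0)
--     rows: list[dict[str, str]] = []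
--     for index in range(max_len):
--         row: dict[str, str] = {"lesson": str(index + 1)}
--         for label, values in order:
--             row[label] = values[index] if index < len(values) else ""
--         rows.append(row)
--     return rows
-- ===== SOURCE B (Python) =====
-- def _week_rows(week: dict[str, list[str]]) -> list[dict[str, str]]:
--     # Column-major construction: process one weekday column at a time, growing the
--     # row list on demand and backfilling earlier labels, instead of A's row-major
--     # index loop over a precomputed max length.
--     rows: list[dict[str, str]] = []
--     seen: list[str] = []
--     for label, en, de in (
--         ("Mo", "monday", "Montag"),
--         ("Di", "tuesday", "Dienstag"),
--         ("Mi", "wednesday", "Mittwoch"),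
--         ("Do", "thursday", "Donnerstag"),
--         ("Fr", "friday", "Freitag"),
--     ):
--         values = week.get(en) or week.get(de) or []
--         while len(rows) < len(values):
--             row = {"lesson": str(len(rows) + 1)}
--             for prev in seen:
--                 row[prev] = ""
--             rows.append(row)
--         for i, row in enumerate(rows):
--             row[label] = values[i] if i < len(values) else ""
--         seen.append(label)
--     return rows
-- ===== Notes on version B (the rewrite author's own statement) =====
-- stated objective: alternative
-- what changed: Replaces A's row-major construction (compute max_len, then for each index build a row by scanning all five columns) with a column-major pass that processes one weekday at a time, growing the row list on demand, backfilling earlier labels with "" in newly created rows and padding shorter columns.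
import Mathlib
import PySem

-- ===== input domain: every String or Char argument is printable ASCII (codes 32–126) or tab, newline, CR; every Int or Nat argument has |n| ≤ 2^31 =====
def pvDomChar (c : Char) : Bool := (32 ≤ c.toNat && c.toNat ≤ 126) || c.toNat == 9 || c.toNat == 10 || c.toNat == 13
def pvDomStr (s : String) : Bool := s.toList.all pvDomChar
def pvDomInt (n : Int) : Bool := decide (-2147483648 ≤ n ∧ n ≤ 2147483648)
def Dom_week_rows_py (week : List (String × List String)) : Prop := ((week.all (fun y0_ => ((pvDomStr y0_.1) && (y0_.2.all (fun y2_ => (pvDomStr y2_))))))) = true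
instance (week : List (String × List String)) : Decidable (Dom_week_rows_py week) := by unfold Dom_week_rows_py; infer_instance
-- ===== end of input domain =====

-- B rebuilds the table column-major (one weekday at a time, growing the row list and
-- backfilling earlier labels) instead of A's row-major max_len index loop (alternative; same cost).


-- ===== PORT A =====
-- Python's `x or y` where x is week.get(...): a missing key or an empty list falls through.
def pvOrList (o : Option (List String)) (d : List String) : List String :=
  match o with
  | some l => if l.isEmpty then d else l
  | none => d

-- A's literal `order` list of ("label", values-with-fallback) pairs.
def pvOrder (week : List (String × List String)) : List (String × List String) :=
  let d := PySem.Dict.mk week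
  [("Mo", pvOrList (d.get? "monday") (pvOrList (d.get? "Montag") [])),
   ("Di", pvOrList (d.get? "tuesday") (pvOrList (d.get? "Dienstag") [])),
   ("Mi", pvOrList (d.get? "wednesday") (pvOrList (d.get? "Mittwoch") [])),
   ("Do", pvOrList (d.get? "thursday") (pvOrList (d.get? "Donnerstag") [])),
   ("Fr", pvOrList (d.get? "friday") (pvOrList (d.get? "Freitag") []))]

def week_rows_py (week : List (String × List String)) : List (List (String × String)) :=
  let order := pvOrder week
  let maxLen : Int := (order.map (fun p => (p.2.length : Int))).foldl max 0
  (PySem.List.pyRange 0 maxLen 1).map (fun index =>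
    (order.foldl (fun (row : PySem.Dict String String) p =>
        row.insert p.1 (if index < (p.2.length : Int) then PySem.List.pyGetD p.2 index "" else ""))
      ((PySem.Dict.empty).insert "lesson" (PySem.Int.toStr (index + 1)))).items)

-- ===== PORT B =====
-- `row = {"lesson": str(len(rows)+1)}; for prev in seen: row[prev] = ""` — a fresh padded row.
def pvNewRow (seen : List String) (len : Nat) : PySem.Dict String String :=
  seen.foldl (fun d l => d.insert l "")
    ((PySem.Dict.empty).insert "lesson" (PySem.Int.toStr ((len : Int) + 1)))

-- `while len(rows) < len(values): rows.append(...)`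
def pvExtend (rows : List (PySem.Dict String String)) (seen : List String) (n : Nat) :
    List (PySem.Dict String String) :=
  if rows.length < n then pvExtend (rows ++ [pvNewRow seen rows.length]) seen n else rows
termination_by n - rows.length
decreasing_by simp; omega

-- one iteration of B's main loop: extend, then `for i, row in enumerate(rows): row[label] = …`
def pvFillCol (st : List (PySem.Dict String String) × List String) (label : String)
    (values : List String) : List (PySem.Dict String String) × List String :=
  let rows := pvExtend st.1 st.2 values.length
  (rows.mapIdx (fun i row =>
      row.insert label (if i < values.length then values.getD i "" else "")),
   st.2 ++ [label])

-- the literal (label, english key, german key) tuples B iterates over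
def pvSpec : List (String × String × String) :=
  [("Mo", "monday", "Montag"), ("Di", "tuesday", "Dienstag"), ("Mi", "wednesday", "Mittwoch"),
   ("Do", "thursday", "Donnerstag"), ("Fr", "friday", "Freitag")]

def week_rows_py_alt (week : List (String × List String)) : List (List (String × String)) :=
  (pvSpec.foldl (fun st t =>
      pvFillCol st t.1 (pvOrList ((PySem.Dict.mk week).get? t.2.1)
        (pvOrList ((PySem.Dict.mk week).get? t.2.2) []))) ([], [])).1.map (·.items)

-- ===== PRECONDITION & SPEC =====
def Spec_week_rows_py (week : List (String × List String)) (out : List (List (String × String))) : Prop := out = week_rows_py_alt week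
instance (week : List (String × List String)) (out : List (List (String × String))) : Decidable (Spec_week_rows_py week out) := by unfold Spec_week_rows_py; infer_instance

-- ===== CLAIM (what is proved, stated in full; the proofs are below) =====
def Claim_equal_week_rows_py : Prop := ∀ (week : List (String × List String)), Dom_week_rows_py week → Spec_week_rows_py week (week_rows_py week)

-- ===== LEMMAS AND PROOFS =====
def pvMaxLen (cols : List (String × List String)) : Nat :=
  (cols.map (fun p => p.2.length)).foldl max 0

-- common characterization: row i holds each column's i-th entry (or "")
def pvRowsOf (cols : List (String × List String)) : List (PySem.Dict String String) :=
  (List.range (pvMaxLen cols)).map (fun (i : Nat) =>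
    cols.foldl (fun (d : PySem.Dict String String) p => d.insert p.1 (p.2.getD i ""))
      ((PySem.Dict.empty).insert "lesson" (PySem.Int.toStr ((i : Int) + 1))))

theorem pv_le_foldl_max (l : List Nat) (a : Nat) : a ≤ l.foldl max a := by
  induction l generalizing a with
  | nil => simp
  | cons x xs ih => exact le_trans (le_max_left a x) (ih (max a x))

theorem pv_mem_le_foldl_max (l : List Nat) (a x : Nat) (hx : x ∈ l) : x ≤ l.foldl max a := by
  induction l generalizing a with
  | nil => simp at hx
  | cons y ys ih =>
    rcases List.mem_cons.1 hx with rfl | h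
    · exact le_trans (le_max_right a x) (pv_le_foldl_max ys (max a x))
    · exact ih (max a y) h

theorem pvMaxLen_append (cols : List (String × List String)) (label : String) (v : List String) :
    pvMaxLen (cols ++ [(label, v)]) = max (pvMaxLen cols) v.length := by
  simp [pvMaxLen, List.foldl_append]

theorem pv_col_le (cols : List (String × List String)) (p : String × List String)
    (hp : p ∈ cols) : p.2.length ≤ pvMaxLen cols :=
  pv_mem_le_foldl_max _ 0 _ (List.mem_map.2 ⟨p, hp, rfl⟩)

-- a fresh padded row is exactly what the characterization's fold produces past all columns
theorem pvNewRow_eq (cols : List (String × List String)) (i : Nat)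
    (h : ∀ p ∈ cols, p.2.length ≤ i) :
    pvNewRow (cols.map (·.1)) i =
      cols.foldl (fun (d : PySem.Dict String String) p => d.insert p.1 (p.2.getD i ""))
        ((PySem.Dict.empty).insert "lesson" (PySem.Int.toStr ((i : Int) + 1))) := by
  unfold pvNewRow
  generalize ((PySem.Dict.empty).insert "lesson" (PySem.Int.toStr ((i : Int) + 1))) = base
  induction cols generalizing base with
  | nil => rfl
  | cons c cs ih =>
    simp only [List.map_cons, List.foldl_cons]
    rw [List.getD_eq_default _ _ (h c (List.mem_cons_self))]
    exact ih (fun p hp => h p (List.mem_cons_of_mem _ hp)) _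

theorem pvExtend_eq (seen : List String) (n : Nat) :
    ∀ (k : Nat) (rows : List (PySem.Dict String String)), n - rows.length = k →
    pvExtend rows seen n =
      rows ++ (List.range k).map (fun j => pvNewRow seen (rows.length + j)) := by
  intro k
  induction k with
  | zero =>
    intro rows hk
    rw [pvExtend, if_neg (by omega)]
    simp
  | succ m ih =>
    intro rows hk
    rw [pvExtend, if_pos (by omega)]
    rw [ih (rows ++ [pvNewRow seen rows.length]) (by simp; omega)]
    simp only [List.append_assoc, List.length_append, List.length_cons, List.length_nil]
    congr 1
    rw [List.range_succ_eq_map]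
    simp only [List.map_cons, List.map_map, List.singleton_append, Nat.add_zero]
    congr 1
    apply List.map_congr_left
    intro j _
    simp only [Function.comp_apply]
    congr 1
    omega

-- one column pass preserves the characterization
theorem pvFillCol_step (cols : List (String × List String)) (label : String)
    (values : List String) :
    pvFillCol (pvRowsOf cols, cols.map (·.1)) label values =
      (pvRowsOf (cols ++ [(label, values)]), (cols ++ [(label, values)]).map (·.1)) := by
  unfold pvFillCol
  refine Prod.ext ?_ (by simp)
  have hlen : (pvRowsOf cols).length = pvMaxLen cols := by simp [pvRowsOf]
  rw [pvExtend_eq (cols.map (·.1)) values.length (values.length - pvMaxLen cols) (pvRowsOf cols)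
    (by omega)]
  simp only [hlen]
  apply List.ext_getElem
  · simp [pvRowsOf, pvMaxLen_append]; omega
  · intro i h1 h2
    simp only [List.getElem_mapIdx]
    have hN : pvMaxLen (cols ++ [(label, values)]) = max (pvMaxLen cols) values.length :=
      pvMaxLen_append cols label values
    have hi : i < max (pvMaxLen cols) values.length := by
      simp [pvRowsOf, hN] at h2; omega
    have hguard : (if i < values.length then values.getD i "" else "") = values.getD i "" := by
      split
      · rfl
      · rw [List.getD_eq_default _ _ (by omega)]
    have hrhs : (pvRowsOf (cols ++ [(label, values)]))[i] =
        (cols.foldl (fun (d : PySem.Dict String String) p => d.insert p.1 (p.2.getD i ""))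
          ((PySem.Dict.empty).insert "lesson" (PySem.Int.toStr ((i : Int) + 1)))).insert label
          (values.getD i "") := by
      simp only [pvRowsOf, List.getElem_map, List.getElem_range, List.foldl_append,
        List.foldl_cons, List.foldl_nil]
    rw [hrhs, hguard]
    congr 1
    by_cases hcase : i < pvMaxLen cols
    · rw [List.getElem_append_left (by simpa [pvRowsOf] using hcase)]
      simp [pvRowsOf]
    · rw [List.getElem_append_right (by simp [pvRowsOf]; omega)]
      simp only [List.getElem_map, List.getElem_range]
      have : pvMaxLen cols + (i - (pvRowsOf cols).length) = i := by
        simp [pvRowsOf]; omega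
      rw [this]
      exact pvNewRow_eq cols i (fun p hp => le_trans (pv_col_le cols p hp) (by omega))

theorem pvFillCol_foldl (ps : List (String × List String)) :
    ∀ cols : List (String × List String),
    ps.foldl (fun st p => pvFillCol st p.1 p.2) (pvRowsOf cols, cols.map (·.1)) =
      (pvRowsOf (cols ++ ps), (cols ++ ps).map (·.1)) := by
  induction ps with
  | nil => intro cols; simp
  | cons p ps ih =>
    intro cols
    simp only [List.foldl_cons]
    rw [pvFillCol_step cols p.1 p.2, ih (cols ++ [(p.1, p.2)])]
    simp

theorem pvAlt_body (week : List (String × List String)) :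
    (pvSpec.foldl (fun st t =>
        pvFillCol st t.1 (pvOrList ((PySem.Dict.mk week).get? t.2.1)
          (pvOrList ((PySem.Dict.mk week).get? t.2.2) []))) ([], [])).1.map (·.items) =
      (pvRowsOf (pvOrder week)).map (·.items) := by
  have hfold : pvSpec.foldl (fun st t =>
      pvFillCol st t.1 (pvOrList ((PySem.Dict.mk week).get? t.2.1)
        (pvOrList ((PySem.Dict.mk week).get? t.2.2) [])))
      (pvRowsOf [], ([] : List (String × List String)).map (·.1)) =
      (pvOrder week).foldl (fun st p => pvFillCol st p.1 p.2)
        (pvRowsOf [], ([] : List (String × List String)).map (·.1)) := by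
    simp [pvSpec, pvOrder]
  have hinit : (([], []) : List (PySem.Dict String String) × List String) =
      (pvRowsOf [], ([] : List (String × List String)).map (·.1)) := by
    simp [pvRowsOf, pvMaxLen]
  rw [hinit, hfold, pvFillCol_foldl (pvOrder week) []]
  simp

theorem pvAlt_char (week : List (String × List String)) :
    week_rows_py_alt week = (pvRowsOf (pvOrder week)).map (·.items) := pvAlt_body week

theorem pvMaxInt_cast (l : List (String × List String)) :
    ∀ a : Nat, (l.map (fun p => (p.2.length : Int))).foldl max (a : Int) =
      (((l.map (fun p => p.2.length)).foldl max a : Nat) : Int) := by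
  induction l with
  | nil => intro a; rfl
  | cons x xs ih =>
    intro a
    simp only [List.map_cons, List.foldl_cons]
    rw [← Nat.cast_max, ih (max a x.2.length)]

theorem pvGuard_eq (x : List String) (k : Nat) :
    (if (k : Int) < (x.length : Int) then PySem.List.pyGetD x (k : Int) "" else "") =
      x.getD k "" := by
  rw [PySem.List.pyGetD_natCast]
  split_ifs with h
  · rfl
  · rw [List.getD_eq_default x "" (by omega)]

theorem pvA_body (cols : List (String × List String)) :
    (PySem.List.pyRange 0 ((cols.map (fun p => (p.2.length : Int))).foldl max 0) 1).map
      (fun index =>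
        (cols.foldl (fun (row : PySem.Dict String String) p =>
            row.insert p.1 (if index < (p.2.length : Int) then PySem.List.pyGetD p.2 index "" else ""))
          ((PySem.Dict.empty).insert "lesson" (PySem.Int.toStr (index + 1)))).items) =
      (pvRowsOf cols).map (·.items) := by
  have hmax := pvMaxInt_cast cols 0
  simp only [Nat.cast_zero] at hmax
  rw [hmax, PySem.List.pyRange_zero_natCast]
  simp only [pvRowsOf, pvMaxLen, List.map_map]
  apply List.map_congr_left
  intro k _
  simp only [Function.comp_apply]
  congr 1
  apply PySem.List.foldl_congr_mem
  intro acc p _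
  rw [pvGuard_eq p.2 k]

theorem pvA_char (week : List (String × List String)) :
    week_rows_py week = (pvRowsOf (pvOrder week)).map (·.items) := pvA_body (pvOrder week)

-- ===== VERDICT (by name: the statement is the Claim_ definition above) =====
theorem week_rows_py_spec : Claim_equal_week_rows_py := by
  intro week _
  exact (pvA_char week).trans (pvAlt_char week).symm
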